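-- pv_equiv track=rewrite | github.com/antonforsstrom/adventofcode | day4.py | check_max_two_adj_digits
-- ===== SOURCE A (Python) =====
-- def check_max_two_adj_digits(pw):
--     count_occur = {}
--
--     for i in range(1, len(pw)):
--         if pw[i-1] == pw[i]:
--             if pw[i] in count_occur:
--                 count_occur[pw[i]] += 1
--             else:
--                 count_occur[pw[i]] = 1
--
--     for val in count_occur.values():
--         if val == 1:
--             return True
--
--     return False
-- ===== SOURCE B (Python) =====
-- def check_max_two_adj_digits(pw):
--     counts = {}
--     i, n = 0, len(pw)
--     while i < n:
--         j = i
--         while j < n and pw[j] == pw[i]: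
--             j += 1
--         if j - i > 1:
--             counts[pw[i]] = counts.get(pw[i], 0) + (j - i - 1)
--         i = j
--     return 1 in counts.values()
-- ===== Notes on version B (the rewrite author's own statement) =====
-- stated objective: alternative
-- what changed: B walks maximal runs of equal characters (run-length decomposition), adding run_len-1 per character once per run, instead of A's pairwise adjacent-index scan that branches on the dict for every equal pair; the final check becomes a membership test on the values.
import Mathlib
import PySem

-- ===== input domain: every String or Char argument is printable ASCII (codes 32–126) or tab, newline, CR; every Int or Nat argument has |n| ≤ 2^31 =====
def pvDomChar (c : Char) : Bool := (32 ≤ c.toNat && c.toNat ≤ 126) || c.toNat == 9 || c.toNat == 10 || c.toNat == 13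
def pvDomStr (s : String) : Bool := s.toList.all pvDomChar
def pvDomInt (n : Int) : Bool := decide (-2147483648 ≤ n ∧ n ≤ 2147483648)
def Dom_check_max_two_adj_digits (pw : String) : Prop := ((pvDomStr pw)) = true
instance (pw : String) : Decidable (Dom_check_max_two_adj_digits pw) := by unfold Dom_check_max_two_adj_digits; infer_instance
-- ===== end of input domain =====

-- B re-implements A by walking maximal runs of equal characters and accumulating
-- (run length - 1) per character, instead of A's pairwise adjacent-index scan;
-- the return value is proved equal on all inputs (A is total).

-- ===== PORT A =====
-- A's first loop: for i in range(1, len(pw)): if pw[i-1] == pw[i]: …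
def pvAFold (cs : List Char) : PySem.Dict Char Int :=
  (PySem.List.pyRange 1 (cs.length : Int) 1).foldl
    (fun d i =>
      if PySem.List.pyGetD cs (i - 1) ' ' == PySem.List.pyGetD cs i ' ' then
        if d.contains (PySem.List.pyGetD cs i ' ') then
          d.modify (PySem.List.pyGetD cs i ' ') 0 (· + 1)
        else
          d.insert (PySem.List.pyGetD cs i ' ') 1
      else d)
    (PySem.Dict.empty : PySem.Dict Char Int)

-- A's second loop: 'for val in count_occur.values(): if val == 1: return True; return False'
def pvAnyOne : List Int → Bool
  | [] => false
  | v :: r => if v == (1 : Int) then true else pvAnyOne r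

def check_max_two_adj_digits (pw : String) : Bool :=
  pvAnyOne (pvAFold pw.toList).values

-- ===== PORT B =====
-- Source B's outer while loop: scan one maximal run, update the dict, continue after the run
def pvAltRuns : List Char → PySem.Dict Char Int → PySem.Dict Char Int
  | [], d => d
  | c :: rest, d =>
    let run := rest.takeWhile (fun x => x == c)
    let d' := if run.length ≥ 1 then d.insert c (d.getD c 0 + (run.length : Int)) else d
    pvAltRuns (rest.dropWhile (fun x => x == c)) d'
termination_by cs _ => cs.length
decreasing_by simpa using Nat.lt_succ_of_le (List.length_dropWhile_le _ _)

def check_max_two_adj_digits_alt (pw : String) : Bool :=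
  ((pvAltRuns pw.toList PySem.Dict.empty).values).contains (1 : Int)

-- ===== PRECONDITION & SPEC =====
def Spec_check_max_two_adj_digits (pw : String) (out : Bool) : Prop := out = check_max_two_adj_digits_alt pw
instance (pw : String) (out : Bool) : Decidable (Spec_check_max_two_adj_digits pw out) := by unfold Spec_check_max_two_adj_digits; infer_instance

-- ===== CLAIM (what is proved, stated in full; the proofs are below) =====
def Claim_equal_check_max_two_adj_digits : Prop := ∀ (pw : String), Dom_check_max_two_adj_digits pw → Spec_check_max_two_adj_digits pw (check_max_two_adj_digits pw)

-- ===== LEMMAS AND PROOFS =====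

-- A's per-pair dict update, and the pair-level step both sides reduce to
def pvUpd (d : PySem.Dict Char Int) (c : Char) : PySem.Dict Char Int :=
  if d.contains c then d.modify c 0 (· + 1) else d.insert c 1

def pvPairStep (d : PySem.Dict Char Int) (p : Char × Char) : PySem.Dict Char Int :=
  if p.1 == p.2 then pvUpd d p.2 else d

theorem pvUpd_eq_insert (d : PySem.Dict Char Int) (c : Char) :
    pvUpd d c = d.insert c (d.getD c 0 + 1) := by
  unfold pvUpd
  by_cases h : d.contains c
  · simp [h, PySem.Dict.modify]
  · have h' : d.contains c = false := by simpa using h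
    rw [if_neg (by simp [h']), PySem.Dict.getD_of_not_contains d 0 h']
    norm_num

-- the adjacent pairs of a list, as indexed getD pairs
theorem pvZip_eq_mapRange (cs : List Char) :
    cs.zip cs.tail
      = (List.range (cs.length - 1)).map (fun k => (cs.getD k ' ', cs.getD (k + 1) ' ')) := by
  apply List.ext_getElem
  · simp only [List.length_zip, List.length_tail, List.length_map, List.length_range]
    omega
  · intro k h1 h2
    have hk : k < cs.length - 1 := by simpa using h2
    have hk1 : k + 1 < cs.length := by omega
    simp [List.getElem_zip, List.getElem_tail, List.getD_eq_getElem?_getD,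
      List.getElem?_eq_getElem hk1, List.getElem?_eq_getElem (by omega : k < cs.length)]

-- A's fold over range(1, len) is the fold over adjacent pairs
theorem pvAFold_eq_pairFold (cs : List Char) :
    pvAFold cs = (cs.zip cs.tail).foldl pvPairStep PySem.Dict.empty := by
  unfold pvAFold
  rw [PySem.List.pyRange_one, List.foldl_map, pvZip_eq_mapRange, List.foldl_map]
  have hl : ((cs.length : Int) - 1).toNat = cs.length - 1 := by omega
  rw [hl]
  apply PySem.List.foldl_congr_mem
  intro d' k hk
  have hk' : k < cs.length - 1 := List.mem_range.mp hk
  have e1 : (1 : Int) + (k : Int) - 1 = ((k : Nat) : Int) := by omega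
  have e2 : (1 : Int) + (k : Int) = (((k + 1 : Nat)) : Int) := by push_cast; ring
  rw [e1, e2]
  simp only [PySem.List.pyGetD_natCast, pvPairStep, pvUpd]

-- adjacent pairs of a maximal run followed by the rest
theorem pvPairs_replicate_append (m : Nat) (c : Char) (t : List Char) :
    (List.replicate (m + 1) c ++ t).zip (List.replicate (m + 1) c ++ t).tail
      = List.replicate m ((c, c)) ++
          (match t with
           | [] => []
           | y :: _ => (c, y) :: t.zip t.tail) := by
  induction m with
  | zero =>
    cases t with
    | nil => simp
    | cons y ys => simp [List.zip_cons_cons]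
  | succ m ih =>
    have e : List.replicate (m + 1 + 1) c ++ t = c :: (List.replicate (m + 1) c ++ t) := by
      simp [List.replicate_succ]
    have e2 : List.replicate (m + 1) c ++ t = c :: (List.replicate m c ++ t) := by
      simp [List.replicate_succ]
    rw [e2, List.tail_cons] at ih
    rw [e, List.tail_cons, e2, List.zip_cons_cons, ih]
    simp [List.replicate_succ]

-- folding the pair step over m ≥ 1 copies of (c, c) is one insert of getD + m
theorem pvFold_replicate (m : Nat) (c : Char) (d : PySem.Dict Char Int) (hm : 1 ≤ m) :
    (List.replicate m ((c, c))).foldl pvPairStep d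
      = d.insert c (d.getD c 0 + (m : Int)) := by
  induction m generalizing d with
  | zero => omega
  | succ m ih =>
    rw [List.replicate_succ, List.foldl_cons]
    have hstep : pvPairStep d (c, c) = d.insert c (d.getD c 0 + 1) := by
      simp [pvPairStep, pvUpd_eq_insert]
    rw [hstep]
    by_cases hm0 : 1 ≤ m
    · rw [ih _ hm0, PySem.Dict.getD_insert_self, PySem.Dict.insert_insert_self]
      congr 1
      push_cast
      ring
    · have : m = 0 := by omega
      subst this
      simp

-- the head of dropWhile fails the predicate
theorem pvDropWhile_head (p : Char → Bool) (l : List Char) (y : Char) (ys : List Char)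
    (h : l.dropWhile p = y :: ys) : p y = false := by
  induction l with
  | nil => simp [List.dropWhile] at h
  | cons a as ih =>
    rw [List.dropWhile_cons] at h
    by_cases hp : p a
    · rw [if_pos hp] at h; exact ih h
    · rw [if_neg hp] at h
      injection h with h1 _
      subst h1
      simpa using hp

-- a pair (c, y) with y ≠ c does nothing
theorem pvBridge (c y : Char) (hy : (y == c) = false) (d : PySem.Dict Char Int) :
    pvPairStep d (c, y) = d := by
  have hcy : (c == y) = false := by
    simp only [beq_eq_false_iff_ne] at hy ⊢
    exact fun hc => hy hc.symm
  simp [pvPairStep, hcy]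

-- the pair fold equals B's run-by-run recursion
theorem pvPairFold_eq_altRuns (n : Nat) :
    ∀ (cs : List Char), cs.length ≤ n → ∀ (d : PySem.Dict Char Int),
      (cs.zip cs.tail).foldl pvPairStep d = pvAltRuns cs d := by
  induction n with
  | zero =>
    intro cs h d
    have : cs = [] := List.eq_nil_of_length_eq_zero (by omega)
    subst this
    simp [pvAltRuns]
  | succ n ih =>
    intro cs h d
    match cs with
    | [] => simp [pvAltRuns]
    | c :: rest =>
      rw [pvAltRuns]
      set run := rest.takeWhile (fun x => x == c) with hrun
      set t := rest.dropWhile (fun x => x == c) with ht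
      have hrep : run = List.replicate run.length c := by
        apply List.eq_replicate_of_mem
        intro b hb
        have := List.mem_takeWhile_imp hb
        simpa using this
      have hsplit : c :: rest = List.replicate (run.length + 1) c ++ t := by
        rw [List.replicate_succ]
        simp only [List.cons_append]
        congr 1
        rw [← hrep]
        exact (List.takeWhile_append_dropWhile (p := fun x => x == c) (l := rest)).symm
      have hrec : ∀ d', (t.zip t.tail).foldl pvPairStep d' = pvAltRuns t d' := by
        intro d'
        have ht_len : t.length ≤ rest.length := List.length_dropWhile_le _ _
        exact ih t (by simp at h; omega) d'
      have hrest : ∀ d', (match t with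
           | [] => ([] : List (Char × Char))
           | y :: _ => (c, y) :: t.zip t.tail).foldl pvPairStep d' = pvAltRuns t d' := by
        intro d'
        cases htc : t with
        | nil => simp [pvAltRuns]
        | cons y ys =>
          have hy : (y == c) = false := pvDropWhile_head _ rest y ys (ht.symm.trans htc)
          rw [List.foldl_cons, pvBridge c y hy, ← htc, hrec]
      rw [hsplit, pvPairs_replicate_append, List.foldl_append]
      by_cases hm : 1 ≤ run.length
      · rw [pvFold_replicate _ _ _ hm, if_pos hm, hrest]
      · have hm0 : run.length = 0 := by omega
        rw [hm0, if_neg (by omega)]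
        simp only [List.replicate_zero, List.foldl_nil]
        exact hrest d

-- A's early-return loop over the values is membership of 1
theorem pvAnyOne_eq_contains (l : List Int) : pvAnyOne l = l.contains (1 : Int) := by
  induction l with
  | nil => rfl
  | cons v r ih =>
    rw [pvAnyOne, ih]
    by_cases h : v = (1 : Int)
    · simp [h]
    · have h' : ¬ (1 : Int) = v := fun e => h e.symm
      simp [h, h']

-- ===== VERDICT (by name: the statement is the Claim_ definition above) =====
theorem check_max_two_adj_digits_spec : Claim_equal_check_max_two_adj_digits := by
  intro pw _
  unfold Spec_check_max_two_adj_digits check_max_two_adj_digits check_max_two_adj_digits_alt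
  rw [pvAFold_eq_pairFold, pvPairFold_eq_altRuns pw.toList.length pw.toList le_rfl,
    pvAnyOne_eq_contains]
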